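-- pv_equiv track=rewrite | github.com/tobiasbecher/pyRadPlan | pyRadPlan/util/helpers.py | ld2dl
-- ===== SOURCE A (Python) =====
-- def ld2dl(list_of_dicts: list[dict], type_check: bool = True) -> dict[str, list]:
--     """Converts a list of dictionaries to a dictionary of lists.
--
--     Parameters
--     ----------
--     list_of_dicts : list
--         The list of dictionaries to convert.
--     type_check : bool, optional
--         Whether to perform type checking, by default True
--
--     Returns
--     -------
--     dict
--         A dictionary of lists.
--     """
--
--     if type_check:
--         # Check if list_of_dicts is a list
--         if not isinstance(list_of_dicts, list):
--             raise TypeError("The input must be a list.")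
--         # Check if all elements in the list are dictionaries
--         if not all(isinstance(element, dict) for element in list_of_dicts):
--             raise TypeError("All elements in the list must be dictionaries.")
--
--     # Empty input returns empty array
--     if len(list_of_dicts) == 0:
--         return {}
--
--     # Convert the list of dictionaries to a dictionary of lists
--     dict_of_lists = {key: [element[key] for element in list_of_dicts] for key in list_of_dicts[0]}
--
--     return dict_of_lists
-- ===== SOURCE B (Python) =====
-- def ld2dl(list_of_dicts: list[dict], type_check: bool = True) -> dict[str, list]:
--     """Matrix transpose: materialize each dict as a row over the first dict's keys, flip with zip(*...)."""
--     if type_check: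
--         if not isinstance(list_of_dicts, list):
--             raise TypeError("The input must be a list.")
--         if not all(isinstance(element, dict) for element in list_of_dicts):
--             raise TypeError("All elements in the list must be dictionaries.")
--
--     if len(list_of_dicts) == 0:
--         return {}
--
--     keys = list(list_of_dicts[0])
--     rows = [[element[key] for key in keys] for element in list_of_dicts]
--     return {key: list(column) for key, column in zip(keys, zip(*rows))}
-- ===== Notes on version B (the rewrite author's own statement) =====
-- stated objective: alternative
-- what changed: A builds each column directly with a key-outer/row-inner dict comprehension; B instead materializes an intermediate row matrix (one value list per dict over the first dict's keys), transposes it with zip(*rows), and zips the keys with the resulting columns.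
import Mathlib
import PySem

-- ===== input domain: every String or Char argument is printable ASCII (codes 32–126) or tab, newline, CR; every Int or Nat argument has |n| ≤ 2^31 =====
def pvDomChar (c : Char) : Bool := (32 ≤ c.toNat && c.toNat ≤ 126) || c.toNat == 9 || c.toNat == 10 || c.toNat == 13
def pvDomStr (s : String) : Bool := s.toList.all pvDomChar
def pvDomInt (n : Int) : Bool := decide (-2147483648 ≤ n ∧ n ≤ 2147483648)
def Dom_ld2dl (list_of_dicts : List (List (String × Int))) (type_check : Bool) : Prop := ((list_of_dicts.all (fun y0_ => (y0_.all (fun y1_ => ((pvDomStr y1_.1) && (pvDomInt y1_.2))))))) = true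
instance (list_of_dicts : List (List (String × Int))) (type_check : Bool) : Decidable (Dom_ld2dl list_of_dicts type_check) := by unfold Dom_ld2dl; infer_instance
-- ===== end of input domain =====

-- B materializes an intermediate row matrix and transposes it with zip(*rows) instead of A's
-- key-outer/row-inner dict comprehension; return value only.
-- Each inner assoc list models a Python dict via PySem.Dict.ofList (first-occurrence key order, last value wins);
-- element[key] is ported as getD with default 0, exact under Pre_ (the key is present).

-- ===== PORT A =====
def ld2dl (list_of_dicts : List (List (String × Int))) (type_check : Bool) : List (String × List Int) :=
  -- type_check's isinstance guards always pass under the type convention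
  match list_of_dicts with
  | [] => []
  | first :: _ =>
    (PySem.Dict.ofList first).keys.map
      (fun key => (key, list_of_dicts.map (fun element => (PySem.Dict.ofList element).getD key 0)))

-- ===== PORT B =====
-- Python's zip(*rows), ported by hand (not in PySem): take heads while every row is nonempty; exact for
-- the nonempty, equal-length row lists B feeds it (fuel = length of the first row = number of columns).
def pvZipStar : Nat → List (List Int) → List (List Int)
  | 0, _ => []
  | Nat.succ n, rows =>
    if rows.all (fun r => !r.isEmpty) then
      rows.map (fun r => r.headD 0) :: pvZipStar n (rows.map (fun r => r.tail))
    else []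

def ld2dl_alt (list_of_dicts : List (List (String × Int))) (type_check : Bool) : List (String × List Int) :=
  match list_of_dicts with
  | [] => []
  | first :: _ =>
    let keys := (PySem.Dict.ofList first).keys
    let rows := list_of_dicts.map (fun element => keys.map (fun key => (PySem.Dict.ofList element).getD key 0))
    List.zip keys (pvZipStar keys.length rows)

-- ===== PRECONDITION & SPEC =====
-- Pre_ excludes exactly the inputs where A raises KeyError: some key of the first dict missing from a later dict.
def Pre_ld2dl (list_of_dicts : List (List (String × Int))) (type_check : Bool) : Prop :=
  ∀ element ∈ list_of_dicts, ∀ key ∈ (PySem.Dict.ofList (list_of_dicts.headD [])).keys,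
    (PySem.Dict.ofList element).contains key = true
instance (list_of_dicts : List (List (String × Int))) (type_check : Bool) : Decidable (Pre_ld2dl list_of_dicts type_check) := by unfold Pre_ld2dl; infer_instance
def pvWitness_ld2dl : (List (List (String × Int))) × Bool :=
  ([[("a", 1), ("b", 2)], [("a", 3), ("b", 4)]], true)

def Spec_ld2dl (list_of_dicts : List (List (String × Int))) (type_check : Bool) (out : List (String × List Int)) : Prop := out = ld2dl_alt list_of_dicts type_check
instance (list_of_dicts : List (List (String × Int))) (type_check : Bool) (out : List (String × List Int)) : Decidable (Spec_ld2dl list_of_dicts type_check out) := by unfold Spec_ld2dl; infer_instance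

-- ===== CLAIM (what is proved, stated in full; the proofs are below) =====
def Claim_equal_ld2dl : Prop := ∀ (list_of_dicts : List (List (String × Int))) (type_check : Bool), Dom_ld2dl list_of_dicts type_check → Pre_ld2dl list_of_dicts type_check → Spec_ld2dl list_of_dicts type_check (ld2dl list_of_dicts type_check)

-- ===== LEMMAS AND PROOFS =====

-- Transposing a nonempty map-matrix with pvZipStar yields the column lists.
theorem pvZipStar_map_matrix (ds : List (List (String × Int)))
    (f : List (String × Int) → String → Int) (_ : ds ≠ []) :
    ∀ keys : List String,
      pvZipStar keys.length (ds.map (fun d => keys.map (f d)))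
        = keys.map (fun k => ds.map (fun d => f d k)) := by
  intro keys
  induction keys with
  | nil => simp [pvZipStar]
  | cons k ks ih =>
    simp only [List.length_cons, pvZipStar]
    rw [if_pos]
    · have h1 : (ds.map (fun d => (k :: ks).map (f d))).map (fun r => r.headD 0)
          = ds.map (fun d => f d k) := by simp [List.map_map]
      have h2 : (ds.map (fun d => (k :: ks).map (f d))).map (fun r => r.tail)
          = ds.map (fun d => ks.map (f d)) := by simp [List.map_map]
      rw [h1, h2, ih]
      simp
    · simp [List.all_eq_true]

-- Zipping a key list with its own column map is the paired map (B's final zip vs A's comprehension shape).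
theorem zip_self_map (l : List String) (g : String → List Int) :
    l.zip (l.map g) = l.map (fun x => (x, g x)) := by
  induction l with
  | nil => rfl
  | cons x xs ih => simp [ih]

-- ===== VERDICT (by name: the statement is the Claim_ definition above) =====
theorem ld2dl_spec : Claim_equal_ld2dl := by
  intro lod tc _ _
  unfold Spec_ld2dl
  cases lod with
  | nil => rfl
  | cons first rest =>
    simp only [ld2dl, ld2dl_alt]
    rw [pvZipStar_map_matrix (first :: rest)
      (fun d k => (PySem.Dict.ofList d).getD k 0) (by simp)]
    rw [zip_self_map]
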